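-- pv_equiv track=rewrite | github.com/about-joo91/algorithm | 22_09/22_09_19/pro-kakao-archery-bitmask.py | solution
-- ===== SOURCE A (Python) =====
-- def solution(n, info):
--     answer = [0 for _ in range(11)]
--     tmp = [0 for _ in range(11)]
--     max_diff = 0
--
--     for subset in range(1, 1<<10):
--         ryan = 0
--         apeach = 0
--         cnt = 0
--
--         for i in range(10):
--             if subset & (1 << i):
--                 ryan += 10 - i
--                 tmp[i] = info[i]+1
--                 cnt += tmp[i]
--             else:
--                 tmp[i] = 0
--                 if info[i]:
--                     apeach += 10 - i
--
--         if cnt > n: continue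
--
--         tmp[10] = n - cnt
--
--         if ryan - apeach == max_diff:
--             for i in reversed(range(11)):
--                 if tmp[i] > answer[i]:
--                     max_diff = ryan - apeach
--                     answer = tmp[:]
--                     break
--                 elif tmp[i] < answer[i]:
--                     break
--
--         if ryan - apeach > max_diff:
--             max_diff = ryan - apeach
--             answer = tmp[:]
--
--     if max_diff == 0:
--         answer = [-1]
--     return answer
-- ===== SOURCE B (Python) =====
-- def solution(n, info):
--     # DFS over the 10 scoring positions: win position i (spend info[i]+1 arrows)
--     # or cede it; leftover arrows go to the score-0 bin at the leaf.
--     def lex_gt(a, b):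
--         # strict lexicographic 'greater' on lists
--         if not a:
--             return False
--         if not b:
--             return True
--         if a[0] != b[0]:
--             return a[0] > b[0]
--         return lex_gt(a[1:], b[1:])
--
--     def key_gt(a, b):
--         # compare (diff, dist) : first by diff, then dist scanned from the
--         # score-0 end (index 10) downward
--         if a[0] != b[0]:
--             return a[0] > b[0]
--         return lex_gt(list(reversed(a[1])), list(reversed(b[1])))
--
--     best = (0, [0] * 11)
--
--     def dfs(i, r, ryan, apeach, dist):
--         nonlocal best
--         if i >= 10:
--             if r >= 0:
--                 cand = (ryan - apeach, dist + [r])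
--                 if key_gt(cand, best):
--                     best = cand
--             return
--         c = info[i] + 1
--         dfs(i + 1, r - c, ryan + (10 - i), apeach, dist + [c])
--         dfs(i + 1, r, ryan, apeach + ((10 - i) if info[i] != 0 else 0), dist + [0])
--
--     dfs(0, n, 0, 0, [])
--     diff, dist = best
--     return [-1] if diff == 0 else dist
-- ===== Notes on version B (the rewrite author's own statement) =====
-- stated objective: alternative
-- what changed: Replaces A's flat bitmask sweep over range(1,1<<10) with inner index loops and an in-place tmp array by a recursive DFS over the 10 positions (win/cede branches) that threads remaining arrows and running scores and compares candidate leaves with a recursive lexicographic key comparison.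
import Mathlib
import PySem

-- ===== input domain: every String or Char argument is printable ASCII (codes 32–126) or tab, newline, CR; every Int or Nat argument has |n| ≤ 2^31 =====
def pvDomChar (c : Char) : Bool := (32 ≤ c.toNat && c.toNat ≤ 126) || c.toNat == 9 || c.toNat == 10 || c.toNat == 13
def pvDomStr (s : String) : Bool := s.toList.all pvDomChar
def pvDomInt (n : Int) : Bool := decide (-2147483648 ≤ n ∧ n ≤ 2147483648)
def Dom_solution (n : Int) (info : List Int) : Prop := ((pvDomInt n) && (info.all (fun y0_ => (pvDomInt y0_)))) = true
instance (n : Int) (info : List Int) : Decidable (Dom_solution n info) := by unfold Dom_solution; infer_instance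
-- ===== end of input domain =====

-- B is a recursive DFS over the 10 positions (win/cede) instead of A's bitmask sweep;
-- same return value (alternative decomposition, no speed claim).

-- ===== PORT A =====
-- A's tie-break loop 'for i in reversed(range(11)): ...' (indices always in range: both lists have length 11)
def tieScanA (tmp answer : List Int) : Nat → Bool
  | 0 =>
      if PySem.List.pyGetD tmp ((0 : Nat) : Int) 0 > PySem.List.pyGetD answer ((0 : Nat) : Int) 0
      then true else false
  | i + 1 =>
      if PySem.List.pyGetD tmp ((i + 1 : Nat) : Int) 0 > PySem.List.pyGetD answer ((i + 1 : Nat) : Int) 0 then true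
      else if PySem.List.pyGetD tmp ((i + 1 : Nat) : Int) 0 < PySem.List.pyGetD answer ((i + 1 : Nat) : Int) 0 then false
      else tieScanA tmp answer i

-- body of A's inner 'for i in range(10)' loop; 'subset & (1 << i)' is the testBit of the
-- (nonnegative) subset at the (nonnegative) literal i — exact here; tmp[i] = v is List.set
def innerStepA (info : List Int) (subset : Int) (s : Int × Int × Int × List Int) (i : Int) :
    Int × Int × Int × List Int :=
  let ryan := s.1; let apeach := s.2.1; let cnt := s.2.2.1; let tmp := s.2.2.2
  if subset.toNat.testBit i.toNat then
    let v := PySem.List.pyGetD info i 0 + 1     -- info[i] + 1 (index in range under Pre_)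
    (ryan + (10 - i), apeach, cnt + v, tmp.set i.toNat v)
  else
    let tmp := tmp.set i.toNat 0
    if PySem.List.pyGetD info i 0 ≠ 0 then (ryan, apeach + (10 - i), cnt, tmp)
    else (ryan, apeach, cnt, tmp)

-- body of A's outer 'for subset in range(1, 1<<10)' loop (state: max_diff, answer, tmp)
def outerStepA (n : Int) (info : List Int) (st : Int × List Int × List Int) (subset : Int) :
    Int × List Int × List Int :=
  let inner := (PySem.List.pyRange 0 10 1).foldl (innerStepA info subset) (0, 0, 0, st.2.2)
  let ryan := inner.1; let apeach := inner.2.1; let cnt := inner.2.2.1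
  if cnt > n then (st.1, st.2.1, inner.2.2.2)          -- continue
  else
    let tmp := (inner.2.2.2).set 10 (n - cnt)          -- tmp[10] = n - cnt
    let md2 :=
      if ryan - apeach = st.1 then
        (if tieScanA tmp st.2.1 10 then (ryan - apeach, tmp) else (st.1, st.2.1))
      else (st.1, st.2.1)
    if ryan - apeach > md2.1 then (ryan - apeach, tmp, tmp)
    else (md2.1, md2.2, tmp)

def solution (n : Int) (info : List Int) : List Int :=
  let st := (PySem.List.pyRange 1 1024 1).foldl (outerStepA n info)
      (0, List.replicate 11 0, List.replicate 11 0)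
  if st.1 = 0 then [-1] else st.2.1

-- ===== PORT B =====
-- strict lexicographic 'greater' on lists (Source B's lex_gt)
def lexGtB : List Int → List Int → Bool
  | [], _ => false
  | _ :: _, [] => true
  | x :: xs, y :: ys => if x ≠ y then decide (x > y) else lexGtB xs ys

-- Source B's key_gt: first by diff, then the distribution scanned from the score-0 end
def keyGtB (a b : Int × List Int) : Bool :=
  if a.1 ≠ b.1 then decide (a.1 > b.1) else lexGtB a.2.reverse b.2.reverse

-- Source B's dfs (functional: 'best' is threaded); base test 'i >= 10' (dfs is only called with i ≤ 10)
def dfsB (info : List Int) (i : Nat) (r ryan apeach : Int) (dist : List Int)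
    (best : Int × List Int) : Int × List Int :=
  if 10 ≤ i then
    if 0 ≤ r then
      let cand := (ryan - apeach, dist ++ [r])
      if keyGtB cand best then cand else best
    else best
  else
    let c := PySem.List.pyGetD info (i : Int) 0 + 1    -- info[i] + 1 (in range under Pre_)
    let b1 := dfsB info (i + 1) (r - c) (ryan + (10 - (i : Int))) apeach (dist ++ [c]) best
    dfsB info (i + 1) r ryan
      (apeach + (if PySem.List.pyGetD info (i : Int) 0 ≠ 0 then 10 - (i : Int) else 0))
      (dist ++ [0]) b1
termination_by 10 - i
decreasing_by all_goals omega

def solution_alt (n : Int) (info : List Int) : List Int :=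
  let best := dfsB info 0 n 0 0 [] (0, List.replicate 11 0)
  if best.1 = 0 then [-1] else best.2

-- ===== PRECONDITION & SPEC =====
-- A reads info[0]..info[9]; it raises IndexError iff the list has fewer than 10 entries.
def Pre_solution (n : Int) (info : List Int) : Prop := 10 ≤ info.length
instance (n : Int) (info : List Int) : Decidable (Pre_solution n info) := by
  unfold Pre_solution; infer_instance

def pvWitness_solution : Int × List Int := (5, [0, 1, 2, 0, 1, 2, 0, 1, 2, 0])

def Spec_solution (n : Int) (info : List Int) (out : List Int) : Prop := out = solution_alt n info
instance (n : Int) (info : List Int) (out : List Int) : Decidable (Spec_solution n info out) := by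
  unfold Spec_solution; infer_instance

-- ===== CLAIM (what is proved, stated in full; the proofs are below) =====
def Claim_equal_solution : Prop := ∀ (n : Int) (info : List Int), Dom_solution n info →
  Pre_solution n info → Spec_solution n info (solution n info)

-- ===== LEMMAS AND PROOFS =====

-- canonical pieces both ports reduce to
def updK (s c : Int × List Int) : Int × List Int := if keyGtB c s then c else s
def postK (s : Int × List Int) : List Int := if s.1 = 0 then [-1] else s.2

-- per-choice-vector quantities: (ryan, apeach, cnt, dist) for positions k, k+1, …
def specV (info : List Int) : Nat → List Bool → Int × Int × Int × List Int
  | _, [] => (0, 0, 0, [])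
  | k, b :: v =>
    let s := specV info (k + 1) v
    if b then
      ((10 - (k : Int)) + s.1, s.2.1,
        (PySem.List.pyGetD info (k : Int) 0 + 1) + s.2.2.1,
        (PySem.List.pyGetD info (k : Int) 0 + 1) :: s.2.2.2)
    else
      (s.1, (if PySem.List.pyGetD info (k : Int) 0 ≠ 0 then 10 - (k : Int) else 0) + s.2.1,
        s.2.2.1, 0 :: s.2.2.2)

def candVF (info : List Int) (k : Nat) (r ryan apeach : Int) (dist : List Int) (v : List Bool) :
    Option (Int × List Int) :=
  let s := specV info k v
  if 0 ≤ r - s.2.2.1 then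
    some (ryan + s.1 - (apeach + s.2.1), dist ++ s.2.2.2 ++ [r - s.2.2.1])
  else none

def candA (n : Int) (info : List Int) (v : List Bool) : Option (Int × List Int) :=
  let s := specV info 0 v
  if 0 ≤ n - s.2.2.1 then some (s.1 - s.2.1, s.2.2.2 ++ [n - s.2.2.1]) else none

def allVecs : Nat → List (List Bool)
  | 0 => [[]]
  | m + 1 => (allVecs m).map (fun v => true :: v) ++ (allVecs m).map (fun v => false :: v)

def optUpd (s : Int × List Int) (c? : Option (Int × List Int)) : Int × List Int :=
  match c? with
  | some c => updK s c
  | none => s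

def keyA (n : Int) (info : List Int) (x : Int) : Option (Int × List Int) :=
  candA n info ((List.range 10).map x.toNat.testBit)

-- ---- order facts about lexGtB / keyGtB ----
lemma lexGtB_irrefl (a : List Int) : lexGtB a a = false := by
  induction a with
  | nil => rfl
  | cons x xs ih => simp [lexGtB, ih]

lemma lexGtB_trans : ∀ {a b c : List Int}, lexGtB a b = true → lexGtB b c = true →
    lexGtB a c = true := by
  intro a
  induction a with
  | nil => intro b c h1; simp [lexGtB] at h1
  | cons x xs ih =>
    intro b c h1 h2
    cases b with
    | nil => cases c <;> simp [lexGtB] at h2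
    | cons y ys =>
      cases c with
      | nil => simp [lexGtB]
      | cons z zs =>
        simp only [lexGtB] at h1 h2 ⊢
        by_cases hxy : x = y
        · subst hxy
          simp at h1
          by_cases hyz : x = z
          · subst hyz; simp at h2 ⊢; exact ih h1 h2
          · simp [hyz] at h2 ⊢; exact h2
        · simp [hxy] at h1
          by_cases hyz : y = z
          · subst hyz; simp [hxy]; omega
          · simp [hyz] at h2
            have hxz : x ≠ z := by omega
            simp [hxz]; omega

lemma lexGtB_conn : ∀ {a b : List Int}, lexGtB a b = false → lexGtB b a = false → a = b := by
  intro a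
  induction a with
  | nil => intro b h1 h2; cases b with
    | nil => rfl
    | cons y ys => simp [lexGtB] at h2
  | cons x xs ih =>
    intro b h1 h2
    cases b with
    | nil => simp [lexGtB] at h1
    | cons y ys =>
      simp only [lexGtB] at h1 h2
      by_cases hxy : x = y
      · subst hxy; simp at h1 h2; rw [ih h1 h2]
      · simp [hxy, Ne.symm hxy] at h1 h2; omega

lemma keyGtB_irrefl (a : Int × List Int) : keyGtB a a = false := by
  simp [keyGtB, lexGtB_irrefl]

lemma keyGtB_trans {a b c : Int × List Int} (h1 : keyGtB a b = true) (h2 : keyGtB b c = true) :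
    keyGtB a c = true := by
  simp only [keyGtB] at h1 h2 ⊢
  by_cases hab : a.1 = b.1
  · by_cases hbc : b.1 = c.1
    · simp [hab, hbc] at h1 h2 ⊢
      exact lexGtB_trans h1 h2
    · simp [hab, hbc] at h1 h2 ⊢
      omega
  · by_cases hbc : b.1 = c.1
    · simp [hab, hbc] at h1 h2 ⊢
      by_cases hac : a.1 = c.1
      · simp only [hac, if_pos rfl] at h1 ⊢
        simp at h1 ⊢
        exact lexGtB_trans h1 h2
      · simp [hac] at h1 ⊢; omega
    · simp [hab, hbc] at h1 h2 ⊢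
      have hac : a.1 ≠ c.1 := by omega
      simp [hac]; omega

lemma keyGtB_conn {a b : Int × List Int} (h1 : keyGtB a b = false) (h2 : keyGtB b a = false) :
    a = b := by
  simp only [keyGtB] at h1 h2
  by_cases hab : a.1 = b.1
  · simp [hab] at h1 h2
    have := lexGtB_conn h1 h2
    have h2' : a.2 = b.2 := by
      have := congrArg List.reverse this; simpa using this
    exact Prod.ext hab h2'
  · simp [hab, Ne.symm hab] at h1 h2; omega

lemma keyGtB_asymm {a b : Int × List Int} (h1 : keyGtB a b = true) : keyGtB b a = false := by
  cases h2 : keyGtB b a with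
  | false => rfl
  | true => have := keyGtB_trans h1 h2; rw [keyGtB_irrefl] at this; cases this

lemma updK_comm (s a b : Int × List Int) : updK (updK s a) b = updK (updK s b) a := by
  unfold updK
  cases h1 : keyGtB a s with
  | true =>
    cases h2 : keyGtB b s with
    | true =>
      simp only [h1, h2, if_true]
      cases h3 : keyGtB b a with
      | true =>
        have h4 := keyGtB_asymm h3
        simp [h3, h4]
      | false =>
        cases h4 : keyGtB a b with
        | true => simp [h3, h4]
        | false => simp [h3, h4]; exact keyGtB_conn h4 h3
    | false =>
      simp only [h1, h2, if_true, if_false]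
      cases h3 : keyGtB b a with
      | true => have := keyGtB_trans h3 h1; rw [this] at h2; cases h2
      | false => simp [h3, h1]
  | false =>
    cases h2 : keyGtB b s with
    | true =>
      simp only [h1, h2, if_true, if_false]
      cases h3 : keyGtB a b with
      | true => have := keyGtB_trans h3 h2; rw [this] at h1; cases h1
      | false => simp [h3, h2]
    | false => simp [h1, h2]

-- ---- reduction lemmas ----
lemma keyGtB_fst_lt {c s : Int × List Int} (h : c.1 < s.1) : keyGtB c s = false := by
  have : c.1 ≠ s.1 := by omega
  simp [keyGtB, this]; omega

lemma keyGtB_fst_gt {c s : Int × List Int} (h : s.1 < c.1) : keyGtB c s = true := by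
  have : c.1 ≠ s.1 := by omega
  simp [keyGtB, this]; omega

lemma updK_fst_eq {s c : Int × List Int} (h : c.1 = s.1) : (updK s c).1 = s.1 := by
  unfold updK; split <;> simp [h]

lemma fold_postK_eq (L : List (Int × List Int)) :
    ∀ s1 s2 : Int × List Int, s1.1 = 0 → s2.1 = 0 →
      postK (List.foldl updK s1 L) = postK (List.foldl updK s2 L) := by
  induction L with
  | nil =>
    intro s1 s2 h1 h2
    simp [postK, h1, h2]
  | cons c L ih =>
    intro s1 s2 h1 h2
    simp only [List.foldl_cons]
    rcases lt_trichotomy c.1 0 with h | h | h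
    · rw [show updK s1 c = s1 by unfold updK; rw [keyGtB_fst_lt (by omega)]; rfl,
         show updK s2 c = s2 by unfold updK; rw [keyGtB_fst_lt (by omega)]; rfl]
      exact ih s1 s2 h1 h2
    · exact ih _ _ (by rw [updK_fst_eq (by omega), h1]) (by rw [updK_fst_eq (by omega), h2])
    · rw [show updK s1 c = c by unfold updK; rw [keyGtB_fst_gt (by omega)]; simp,
         show updK s2 c = c by unfold updK; rw [keyGtB_fst_gt (by omega)]; simp]

lemma specV_len (info : List Int) : ∀ (v : List Bool) (k : Nat),
    (specV info k v).2.2.2.length = v.length := by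
  intro v
  induction v with
  | nil => intro k; rfl
  | cons b v ih =>
    intro k
    cases b <;> simp [specV, ih]

lemma specV_apeach_nonneg (info : List Int) : ∀ (v : List Bool) (k : Nat),
    k + v.length ≤ 10 → 0 ≤ (specV info k v).2.1 := by
  intro v
  induction v with
  | nil => intro k _; simp [specV]
  | cons b v ih =>
    intro k hk
    simp only [List.length_cons] at hk
    have h' := ih (k + 1) (by omega)
    have hk9 : (k : Int) ≤ 9 := by exact_mod_cast (by omega : k ≤ 9)
    cases b
    · simp only [specV]
      refine add_nonneg ?_ h'
      split <;> omega
    · simpa only [specV] using h'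
lemma take_succ_getD {t : List Int} {m : Nat} (h : m < t.length) :
    t.take (m + 1) = t.take m ++ [t.getD m 0] := by
  rw [List.take_succ]
  congr 1
  rw [List.getElem?_eq_getElem h]
  simp [List.getD, List.getElem?_eq_getElem h]

lemma cmpIf (x y : Int) (B : Bool) :
    (if x > y then true else if x < y then false else B) =
    (if x ≠ y then decide (x > y) else B) := by
  rcases lt_trichotomy x y with h | h | h
  · have h1 : ¬ x > y := by omega
    have h2 : x ≠ y := by omega
    simp [h, h1, h2]
  · subst h; simp
  · have h1 : x ≠ y := by omega
    simp [h, h1]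

lemma tie_bridge (t a : List Int) : ∀ m : Nat, m < t.length → m < a.length →
    tieScanA t a m = lexGtB (t.take (m + 1)).reverse (a.take (m + 1)).reverse := by
  intro m
  induction m with
  | zero =>
    intro ht ha
    rw [take_succ_getD ht, take_succ_getD ha]
    simp only [List.take_zero, List.nil_append, List.reverse_singleton]
    show (if PySem.List.pyGetD t ((0:Nat):Int) 0 > PySem.List.pyGetD a ((0:Nat):Int) 0 then true else false)
       = lexGtB [t.getD 0 0] [a.getD 0 0]
    have e1 : PySem.List.pyGetD t ((0:Nat):Int) 0 = t.getD 0 0 := by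
      simpa using PySem.List.pyGetD_natCast t 0 0
    have e2 : PySem.List.pyGetD a ((0:Nat):Int) 0 = a.getD 0 0 := by
      simpa using PySem.List.pyGetD_natCast a 0 0
    rw [e1, e2]
    show _ = (if t.getD 0 0 ≠ a.getD 0 0 then decide (t.getD 0 0 > a.getD 0 0) else lexGtB [] [])
    rw [← cmpIf]
    simp only [lexGtB]
    by_cases h : t.getD 0 0 > a.getD 0 0 <;> simp [h]
  | succ m ih =>
    intro ht ha
    rw [take_succ_getD ht, take_succ_getD ha, List.reverse_append, List.reverse_append]
    simp only [List.reverse_singleton, List.singleton_append]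
    show (if PySem.List.pyGetD t ((m+1:Nat):Int) 0 > PySem.List.pyGetD a ((m+1:Nat):Int) 0 then true
          else if PySem.List.pyGetD t ((m+1:Nat):Int) 0 < PySem.List.pyGetD a ((m+1:Nat):Int) 0 then false
          else tieScanA t a m)
        = lexGtB (t.getD (m+1) 0 :: (t.take (m+1)).reverse) (a.getD (m+1) 0 :: (a.take (m+1)).reverse)
    have e1 : PySem.List.pyGetD t ((m+1:Nat):Int) 0 = t.getD (m+1) 0 := PySem.List.pyGetD_natCast t (m+1) 0
    have e2 : PySem.List.pyGetD a ((m+1:Nat):Int) 0 = a.getD (m+1) 0 := PySem.List.pyGetD_natCast a (m+1) 0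
    rw [e1, e2, ih (by omega) (by omega)]
    show _ = (if t.getD (m+1) 0 ≠ a.getD (m+1) 0 then decide (t.getD (m+1) 0 > a.getD (m+1) 0)
              else lexGtB (t.take (m+1)).reverse (a.take (m+1)).reverse)
    rw [← cmpIf]

lemma specV_true (info : List Int) (k : Nat) (v : List Bool) :
    specV info k (true :: v) =
      ((10 - (k : Int)) + (specV info (k+1) v).1, (specV info (k+1) v).2.1,
       (PySem.List.pyGetD info (k : Int) 0 + 1) + (specV info (k+1) v).2.2.1,
       (PySem.List.pyGetD info (k : Int) 0 + 1) :: (specV info (k+1) v).2.2.2) := by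
  simp [specV]

lemma specV_false (info : List Int) (k : Nat) (v : List Bool) :
    specV info k (false :: v) =
      ((specV info (k+1) v).1,
       (if PySem.List.pyGetD info (k : Int) 0 ≠ 0 then 10 - (k : Int) else 0) + (specV info (k+1) v).2.1,
       (specV info (k+1) v).2.2.1, 0 :: (specV info (k+1) v).2.2.2) := by
  simp [specV]

lemma candVF_true (info : List Int) (k : Nat) (r ry ap : Int) (dist : List Int) (v : List Bool) :
    candVF info k r ry ap dist (true :: v) =
      candVF info (k + 1) (r - (PySem.List.pyGetD info (k : Int) 0 + 1)) (ry + (10 - (k : Int)))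
        ap (dist ++ [PySem.List.pyGetD info (k : Int) 0 + 1]) v := by
  simp only [candVF, specV_true]
  rw [show r - ((PySem.List.pyGetD info (k : Int) 0 + 1) + (specV info (k+1) v).2.2.1)
      = r - (PySem.List.pyGetD info (k : Int) 0 + 1) - (specV info (k+1) v).2.2.1 by ring]
  split
  · congr 1
    refine Prod.ext ?_ ?_
    · simp; ring
    · simp

  · rfl

lemma candVF_false (info : List Int) (k : Nat) (r ry ap : Int) (dist : List Int) (v : List Bool) :
    candVF info k r ry ap dist (false :: v) =
      candVF info (k + 1) r ry
        (ap + (if PySem.List.pyGetD info (k : Int) 0 ≠ 0 then 10 - (k : Int) else 0))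
        (dist ++ [0]) v := by
  simp only [candVF, specV_false]
  split
  · congr 1
    refine Prod.ext ?_ ?_
    · simp; ring
    · simp
  · rfl

lemma dfs_eq (info : List Int) : ∀ (m : Nat), m ≤ 10 →
    ∀ (r ry ap : Int) (dist : List Int) (best : Int × List Int),
      dfsB info (10 - m) r ry ap dist best =
        List.foldl updK best ((allVecs m).filterMap (candVF info (10 - m) r ry ap dist)) := by
  intro m
  induction m with
  | zero =>
    intro _ r ry ap dist best
    rw [dfsB]
    simp only [Nat.sub_zero, le_refl, if_pos]
    simp only [allVecs, List.filterMap]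
    simp only [candVF, specV]
    norm_num
    split
    · simp [updK]
    · rfl
  | succ m ih =>
    intro hm r ry ap dist best
    have hk : 10 - m = (10 - (m+1)) + 1 := by omega
    have hk10 : ¬ 10 ≤ 10 - (m+1) := by omega
    rw [dfsB]
    rw [if_neg hk10]
    rw [← hk]
    rw [ih (by omega), ih (by omega)]
    simp only [allVecs, List.filterMap_append, List.filterMap_map, List.foldl_append]
    congr 1
    · congr 1
      · congr 1
        funext v
        rw [Function.comp_apply, candVF_true, ← hk]
    · congr 1
      funext v
      rw [Function.comp_apply, candVF_false, ← hk]
lemma take_set_succ {α : Type} : ∀ (t : List α) (k : Nat) (v : α), k < t.length →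
    (t.set k v).take (k + 1) = t.take k ++ [v] := by
  intro t
  induction t with
  | nil => intro k v h; simp at h
  | cons x xs ih =>
    intro k v h
    cases k with
    | zero => simp
    | succ k =>
      simp only [List.set_cons_succ, List.take_succ_cons, List.length_cons] at *
      rw [ih k v (by omega)]
      rfl

lemma getD_set_ne {t : List Int} {k j : Nat} (v : Int) (h : k ≠ j) (hj : j < t.length) :
    (t.set k v).getD j 0 = t.getD j 0 := by
  rw [List.getD_eq_getElem _ _ (by simpa using hj), List.getD_eq_getElem _ _ hj]
  exact List.getElem_set_ne h _

lemma take_ten_getD (t : List Int) (ht : t.length = 11) :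
    t.take 10 ++ [t.getD 10 0] = t := by
  have h10 : 10 < t.length := by omega
  rw [List.getD_eq_getElem _ _ h10]
  conv_rhs => rw [← List.take_append_drop 10 t, List.drop_eq_getElem_cons h10]
  rw [List.drop_eq_nil_of_le (by omega : t.length ≤ 10 + 1)]

lemma innerA_gen (info : List Int) (sub : Int) : ∀ (m k : Nat), k + m = 10 →
    ∀ (ry ap c : Int) (t : List Int), t.length = 11 →
      List.foldl (fun s (j : Nat) => innerStepA info sub s (j : Int)) (ry, ap, c, t)
          (List.range' k m) =
        (ry + (specV info k ((List.range' k m).map sub.toNat.testBit)).1,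
         ap + (specV info k ((List.range' k m).map sub.toNat.testBit)).2.1,
         c + (specV info k ((List.range' k m).map sub.toNat.testBit)).2.2.1,
         t.take k ++ (specV info k ((List.range' k m).map sub.toNat.testBit)).2.2.2
           ++ [t.getD 10 0]) := by
  intro m
  induction m with
  | zero =>
    intro k hk ry ap c t ht
    have hk' : k = 10 := by omega
    subst hk'
    simp only [List.range'_zero, List.map_nil, List.foldl_nil, specV, add_zero,
      List.nil_append, List.append_nil]
    rw [take_ten_getD t ht]
  | succ m ih =>
    intro k hk ry ap c t ht
    rw [List.range'_succ]
    simp only [List.map_cons, List.foldl_cons]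
    have hlt : k < t.length := by omega
    by_cases hb : sub.toNat.testBit k
    · have hstep : innerStepA info sub (ry, ap, c, t) (k : Int) =
        (ry + (10 - (k : Int)), ap, c + (PySem.List.pyGetD info (k : Int) 0 + 1),
         t.set k (PySem.List.pyGetD info (k : Int) 0 + 1)) := by
        simp [innerStepA, hb]
      rw [hstep, ih (k+1) (by omega) _ _ _ _ (by simp [ht]), hb, specV_true]
      refine Prod.ext (by simp; ring) (Prod.ext (by simp) (Prod.ext (by simp; ring) ?_))
      simp only
      rw [take_set_succ t k _ hlt, getD_set_ne _ (by omega) (by omega)]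
      simp
    · have hstep : innerStepA info sub (ry, ap, c, t) (k : Int) =
        (ry, ap + (if PySem.List.pyGetD info (k : Int) 0 ≠ 0 then 10 - (k : Int) else 0), c,
         t.set k 0) := by
        simp only [innerStepA, Int.toNat_natCast, hb, if_false, Bool.false_eq_true]
        split <;> simp
      rw [hstep, ih (k+1) (by omega) _ _ _ _ (by simp [ht])]
      rw [show sub.toNat.testBit k = false by simpa using hb, specV_false]
      refine Prod.ext (by simp) (Prod.ext (by simp; ring) (Prod.ext (by simp) ?_))
      simp only
      rw [take_set_succ t k _ hlt, getD_set_ne _ (by omega) (by omega)]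
      simp
lemma set_append_last (D : List Int) (a v : Int) : (D ++ [a]).set D.length v = D ++ [v] := by
  induction D with
  | nil => rfl
  | cons x xs ih => simp [ih]

lemma inner_fold_eq (info : List Int) (x : Int) (t : List Int) (ht : t.length = 11) :
    (PySem.List.pyRange 0 10 1).foldl (innerStepA info x) (0, 0, 0, t) =
      ((specV info 0 ((List.range' 0 10).map x.toNat.testBit)).1,
       (specV info 0 ((List.range' 0 10).map x.toNat.testBit)).2.1,
       (specV info 0 ((List.range' 0 10).map x.toNat.testBit)).2.2.1,
       (specV info 0 ((List.range' 0 10).map x.toNat.testBit)).2.2.2 ++ [t.getD 10 0]) := by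
  rw [PySem.List.pyRange_one]
  rw [List.foldl_map]
  simp only [zero_add]
  rw [show (10:Int) - 0 = 10 by ring]
  rw [show ((10:Int)).toNat = 10 by rfl]
  rw [List.range_eq_range']
  rw [innerA_gen info x 10 0 (by omega) 0 0 0 t ht]
  simp only [zero_add, List.take_zero, List.nil_append]

lemma spec0_len (info : List Int) (x : Int) :
    (specV info 0 ((List.range' 0 10).map x.toNat.testBit)).2.2.2.length = 10 := by
  rw [specV_len]
  simp

lemma keyA_eq (n : Int) (info : List Int) (x : Int) :
    keyA n info x =
      (if 0 ≤ n - (specV info 0 ((List.range' 0 10).map x.toNat.testBit)).2.2.1 then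
        some ((specV info 0 ((List.range' 0 10).map x.toNat.testBit)).1
                - (specV info 0 ((List.range' 0 10).map x.toNat.testBit)).2.1,
              (specV info 0 ((List.range' 0 10).map x.toNat.testBit)).2.2.2
                ++ [n - (specV info 0 ((List.range' 0 10).map x.toNat.testBit)).2.2.1])
      else none) := by
  unfold keyA candA
  rw [List.range_eq_range']

lemma outer_step (n : Int) (info : List Int) (md : Int) (ans t : List Int) (x : Int)
    (ha : ans.length = 11) (ht : t.length = 11) :
    ((outerStepA n info (md, ans, t) x).1, (outerStepA n info (md, ans, t) x).2.1)
        = optUpd (md, ans) (keyA n info x)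
      ∧ (outerStepA n info (md, ans, t) x).2.2.length = 11 := by
  have hD := spec0_len info x
  unfold outerStepA
  rw [inner_fold_eq info x t ht]
  rw [keyA_eq]
  set S := specV info 0 ((List.range' 0 10).map x.toNat.testBit) with hS
  dsimp only
  by_cases hfeas : S.2.2.1 > n
  · rw [if_pos hfeas, if_neg (show ¬ (0:Int) ≤ n - S.2.2.1 by omega)]
    exact ⟨rfl, by simp [hD]⟩
  · rw [if_neg hfeas, if_pos (show (0:Int) ≤ n - S.2.2.1 by omega)]
    have htmp2 : (S.2.2.2 ++ [t.getD 10 0]).set 10 (n - S.2.2.1) = S.2.2.2 ++ [n - S.2.2.1] := by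
      conv_lhs => rw [show (10:Nat) = S.2.2.2.length by rw [hD]]
      exact set_append_last _ _ _
    rw [htmp2]
    have hlen2 : (S.2.2.2 ++ [n - S.2.2.1]).length = 11 := by simp [hD]
    have hbridge : tieScanA (S.2.2.2 ++ [n - S.2.2.1]) ans 10 =
        lexGtB (S.2.2.2 ++ [n - S.2.2.1]).reverse ans.reverse := by
      rw [tie_bridge _ _ 10 (by omega) (by omega)]
      rw [List.take_of_length_le (by omega), List.take_of_length_le (by omega)]
    set tmp2 := S.2.2.2 ++ [n - S.2.2.1] with htm
    rw [hbridge]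
    refine ⟨?_, by split_ifs <;> simpa using hlen2⟩
    simp only [optUpd, updK, keyGtB]
    by_cases hd : S.1 - S.2.1 = md
    · cases hlex : lexGtB tmp2.reverse ans.reverse with
      | true => simp [hd, hlex]
      | false => simp [hd, hlex]
    · by_cases hgt : S.1 - S.2.1 > md
      · simp [hd, hgt]
      · simp [hd, hgt, le_of_not_gt hgt]
lemma cand_snd_len {n : Int} {info : List Int} {v : List Bool} {c : Int × List Int}
    (h : candA n info v = some c) : c.2.length = v.length + 1 := by
  unfold candA at h
  dsimp only at h
  split at h
  · cases h
    simp [specV_len]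
  · cases h

lemma keyA_snd_len {n : Int} {info : List Int} {x : Int} {c : Int × List Int}
    (h : keyA n info x = some c) : c.2.length = 11 := by
  unfold keyA at h
  have := cand_snd_len h
  simpa using this

lemma optUpd_len {n : Int} {info : List Int} {x md : Int} {ans : List Int}
    (ha : ans.length = 11) : (optUpd (md, ans) (keyA n info x)).2.length = 11 := by
  unfold optUpd
  cases h : keyA n info x with
  | none => exact ha
  | some c =>
    cases hg : keyGtB c (md, ans)
    · simp [updK, hg, ha]
    · simp only [updK, hg, if_pos rfl, if_true]
      exact keyA_snd_len h

lemma outer_fold (n : Int) (info : List Int) : ∀ (L : List Int) (md : Int) (ans t : List Int),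
    ans.length = 11 → t.length = 11 →
    ((List.foldl (outerStepA n info) (md, ans, t) L).1,
     (List.foldl (outerStepA n info) (md, ans, t) L).2.1) =
      List.foldl (fun s x => optUpd s (keyA n info x)) (md, ans) L := by
  intro L
  induction L with
  | nil => intro md ans t ha ht; simp
  | cons x L ih =>
    intro md ans t ha ht
    simp only [List.foldl_cons]
    obtain ⟨hstep, hlen⟩ := outer_step n info md ans t x ha ht
    rcases hst : outerStepA n info (md, ans, t) x with ⟨m1, a1, t1⟩
    rw [hst] at hstep hlen
    simp only at hstep hlen
    have ha1 : a1.length = 11 := by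
      have := optUpd_len (n := n) (info := info) (x := x) (md := md) ha
      rw [← hstep] at this
      exact this
    rw [ih m1 a1 t1 ha1 hlen]
    rw [hstep]

lemma fold_optUpd_filterMap (n : Int) (info : List Int) (L : List Int) (s : Int × List Int) :
    List.foldl (fun s x => optUpd s (keyA n info x)) s L =
      List.foldl updK s (L.filterMap (keyA n info)) := by
  rw [List.foldl_filterMap]
  apply PySem.List.foldl_congr_mem
  intro acc x _
  cases h : keyA n info x <;> simp [optUpd, h]
lemma pvRangeTwoMulPerm : ∀ N : Nat,
    (List.range (2 * N)).Perm
      ((List.range N).map (fun q => 2 * q + 1) ++ (List.range N).map (fun q => 2 * q)) := by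
  intro N
  induction N with
  | zero => simp
  | succ N ih =>
    have h1 : 2 * (N + 1) = (2 * N) + 1 + 1 := by omega
    rw [h1, List.range_succ, List.range_succ, List.range_succ]
    simp only [List.map_append, List.map_cons, List.map_nil]
    refine ((ih.append_right [2*N]).append_right [2*N+1]).trans ?_
    refine List.perm_iff_count.mpr ?_
    intro a
    simp only [List.count_append, List.count_cons, List.count_nil]
    by_cases h1 : a = 2 * N <;> by_cases h2 : a = 2 * N + 1 <;> simp [h1, h2] <;> omega
lemma bitvec_odd (m q : Nat) :
    (List.range (m + 1)).map (2 * q + 1).testBit = true :: (List.range m).map q.testBit := by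
  rw [List.range_succ_eq_map, List.map_cons, List.map_map]
  congr 1
  · simp [Nat.testBit_zero]
  · refine List.map_congr_left ?_
    intro i _
    show (2 * q + 1).testBit i.succ = q.testBit i
    rw [Nat.testBit_succ]
    congr 1
    omega

lemma bitvec_even (m q : Nat) :
    (List.range (m + 1)).map (2 * q).testBit = false :: (List.range m).map q.testBit := by
  rw [List.range_succ_eq_map, List.map_cons, List.map_map]
  congr 1
  · simp [Nat.testBit_zero]
  · refine List.map_congr_left ?_
    intro i _
    show (2 * q).testBit i.succ = q.testBit i
    rw [Nat.testBit_succ]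
    congr 1
    omega

lemma vec_perm : ∀ m : Nat,
    (allVecs m).Perm ((List.range (2 ^ m)).map (fun s => (List.range m).map s.testBit)) := by
  intro m
  induction m with
  | zero => simp [allVecs]
  | succ m ih =>
    have hpow : 2 ^ (m + 1) = 2 * 2 ^ m := by rw [pow_succ]; omega
    rw [hpow]
    refine List.Perm.trans ?_ (((pvRangeTwoMulPerm (2 ^ m)).symm).map (fun s => (List.range (m+1)).map s.testBit))
    simp only [allVecs, List.map_append, List.map_map]
    refine List.Perm.append ?_ ?_
    · refine ((ih.map (fun v => true :: v)).trans ?_)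
      rw [List.map_map]
      refine List.Perm.of_eq (List.map_congr_left ?_)
      intro q _
      show true :: (List.range m).map q.testBit = (List.range (m+1)).map ((2*q+1).testBit)
      rw [bitvec_odd]
    · refine ((ih.map (fun v => false :: v)).trans ?_)
      rw [List.map_map]
      refine List.Perm.of_eq (List.map_congr_left ?_)
      intro q _
      show false :: (List.range m).map q.testBit = (List.range (m+1)).map ((2*q).testBit)
      rw [bitvec_even]
lemma candVF0 (n : Int) (info : List Int) (v : List Bool) :
    candVF info 0 n 0 0 [] v = candA n info v := by
  unfold candVF candA
  dsimp only
  split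
  · simp
  · rfl

lemma specV_allfalse (info : List Int) : ∀ (v : List Bool) (k : Nat), (∀ b ∈ v, b = false) →
    (specV info k v).1 = 0 ∧ (specV info k v).2.2.1 = 0 := by
  intro v
  induction v with
  | nil => intro k _; simp [specV]
  | cons b v ih =>
    intro k hb
    have hbf : b = false := hb b (by simp)
    subst hbf
    rw [specV_false]
    exact ih (k+1) (fun x hx => hb x (by simp [hx]))

lemma updK_head_zero {z : List Int} {c : Int × List Int} (hc : c.1 ≤ 0) :
    (updK (0, z) c).1 = 0 := by
  unfold updK
  cases hg : keyGtB c (0, z) with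
  | false => rfl
  | true =>
    simp only [keyGtB] at hg
    by_cases h : c.1 = 0
    · simp [h]
    · simp only [ne_eq, h, not_false_eq_true, if_pos, decide_eq_true_eq] at hg
      omega

set_option maxRecDepth 4096 in
lemma solution_eq_alt (n : Int) (info : List Int) :
    solution n info = solution_alt n info := by
  -- A reduces to a fold of updK over its candidate keys
  have hA : solution n info =
      postK (List.foldl updK (0, List.replicate 11 0)
        ((PySem.List.pyRange 1 1024 1).filterMap (keyA n info))) := by
    unfold solution postK
    rw [← fold_optUpd_filterMap]
    rw [← outer_fold n info _ 0 (List.replicate 11 0) (List.replicate 11 0) (by simp) (by simp)]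
  -- B reduces to a fold of updK over the DFS leaves
  have hB : solution_alt n info =
      postK (List.foldl updK (0, List.replicate 11 0)
        ((allVecs 10).filterMap (candA n info))) := by
    unfold solution_alt postK
    have := dfs_eq info 10 (le_refl 10) n 0 0 [] (0, List.replicate 11 0)
    norm_num at this
    rw [this]
    rw [show (allVecs 10).filterMap (candVF info 0 n 0 0 []) = (allVecs 10).filterMap (candA n info)
      from List.filterMap_congr (fun v _ => candVF0 n info v)]
  rw [hA, hB]
  -- permute B's leaves to subset-numeric order
  have hperm : ((allVecs 10).filterMap (candA n info)).Perm
      (((List.range 1024).map (fun s => (List.range 10).map s.testBit)).filterMap (candA n info)) := by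
    have hpow : (2:Nat) ^ 10 = 1024 := by norm_num
    have hv := vec_perm 10
    rw [hpow] at hv
    exact hv.filterMap _
  have hfold := List.Perm.foldl_eq' hperm
      (fun x _ y _ z => (updK_comm z x y)) ((0:Int), List.replicate 11 (0:Int))
  rw [hfold]
  rw [List.filterMap_map]
  -- split off subset 0
  set bits : Nat → List Bool := (fun s : Nat => (List.range 10).map s.testBit) with hbits
  rw [show (1024:Nat) = 1023 + 1 from rfl, List.range_succ_eq_map, List.filterMap_cons,
    List.filterMap_map]
  -- identify the tail with A's list
  have htail : (PySem.List.pyRange 1 1024 1).filterMap (keyA n info) =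
      (List.range 1023).filterMap (((candA n info) ∘ bits) ∘ Nat.succ) := by
    rw [PySem.List.pyRange_one]
    rw [List.filterMap_map]
    refine List.filterMap_congr ?_
    intro k _
    show keyA n info (1 + (k:Int)) = candA n info (bits k.succ)
    unfold keyA
    have h1 : ((1:Int) + (k:Int)).toNat = k.succ := by omega
    rw [hbits, h1]
  rw [htail]
  -- the subset-0 candidate has nonpositive diff; it cannot change the final answer
  set K := (List.range 1023).filterMap (((candA n info) ∘ bits) ∘ Nat.succ) with hK
  cases h0 : (candA n info ∘ bits) 0 with
  | none => rfl
  | some c =>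
    have hc1 : c.1 ≤ 0 := by
      have hv : bits 0 = List.replicate 10 false := by rw [hbits]; decide
      simp only [Function.comp_apply, hv] at h0
      unfold candA at h0
      dsimp only at h0
      split at h0
      · cases h0
        have hz := specV_allfalse info (List.replicate 10 false) 0 (by simp)
        have hap := specV_apeach_nonneg info (List.replicate 10 false) 0 (by simp)
        simp only [hz.1]
        omega
      · cases h0
    rw [List.foldl_cons]
    exact (fold_postK_eq K _ _ (updK_head_zero hc1) rfl).symm

-- ===== VERDICT (by name: the statement is the Claim_ definition above) =====
theorem solution_spec : Claim_equal_solution := by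
  intro n info _ _
  exact solution_eq_alt n info
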